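-- pv_equiv track=rewrite | github.com/michaelpradel/Testora | src/buggpt/prompts/RegressionClassificationPrompt.py | parse_answer
-- ===== SOURCE A (Python) =====
-- def parse_answer(raw_answer):
--     assert type(raw_answer) == list
--     assert len(raw_answer) == 1
--
--     raw_answer = raw_answer[0]
--
--     in_answer = 0
--     is_relevant_change = None
--     is_deterministic = None
--     is_public = None
--     is_legal = None
--     is_surprising = None
--     for line in raw_answer.split("\n"):
--         if in_answer == 1:
--             if line.strip() == "noteworthy":
--                 is_relevant_change = True
--             elif line.strip() == "minor":
--                 is_relevant_change = False
--         elif in_answer == 2: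
--             if line.strip() == "deterministic":
--                 is_deterministic = True
--             elif line.strip() == "non-deterministic":
--                 is_deterministic = False
--         elif in_answer == 3:
--             if line.strip() == "public":
--                 is_public = True
--             elif line.strip() == "project-internal":
--                 is_public = False
--         elif in_answer == 4:
--             if line.strip() == "legal":
--                 is_legal = True
--             elif line.strip() == "illegal":
--                 is_legal = False
--         elif in_answer == 5:
--             if line.strip() == "intended":
--                 is_surprising = False
--             elif line.strip() == "surprising":
--                 is_surprising = True
--
--         if line.strip() == "</ANSWER1>" or line.strip() == "</ANSWER2>" or line.strip() == "</ANSWER3>":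
--             in_answer = 0
--         if line.strip() == "<ANSWER1>":
--             in_answer = 1
--         if line.strip() == "<ANSWER2>":
--             in_answer = 2
--         if line.strip() == "<ANSWER3>":
--             in_answer = 3
--         if line.strip() == "<ANSWER4>":
--             in_answer = 4
--         if line.strip() == "<ANSWER5>":
--             in_answer = 5
--
--     return is_relevant_change, is_deterministic, is_public, is_legal, is_surprising
-- ===== SOURCE B (Python) =====
-- # Two-pass rewrite: collect stripped lines per section, then classify each
-- # section by a last-match-wins keyword table.
--
-- _TABLES = [
--     {},
--     {"noteworthy": True, "minor": False},
--     {"deterministic": True, "non-deterministic": False},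
--     {"public": True, "project-internal": False},
--     {"legal": True, "illegal": False},
--     {"intended": False, "surprising": True},
-- ]
--
--
-- def _last_flag(lines, table):
--     val = None
--     for s in lines:
--         if s in table:
--             val = table[s]
--     return val
--
--
-- def parse_answer(raw_answer):
--     assert type(raw_answer) == list
--     assert len(raw_answer) == 1
--
--     sections = [[] for _ in range(6)]
--     cur = 0
--     for line in raw_answer[0].split("\n"):
--         s = line.strip()
--         sections[cur].append(s)
--         if s in ("</ANSWER1>", "</ANSWER2>", "</ANSWER3>"):
--             cur = 0
--         elif s == "<ANSWER1>":
--             cur = 1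
--         elif s == "<ANSWER2>":
--             cur = 2
--         elif s == "<ANSWER3>":
--             cur = 3
--         elif s == "<ANSWER4>":
--             cur = 4
--         elif s == "<ANSWER5>":
--             cur = 5
--
--     return (
--         _last_flag(sections[1], _TABLES[1]),
--         _last_flag(sections[2], _TABLES[2]),
--         _last_flag(sections[3], _TABLES[3]),
--         _last_flag(sections[4], _TABLES[4]),
--         _last_flag(sections[5], _TABLES[5]),
--     )
-- ===== Notes on version B (the rewrite author's own statement) =====
-- stated objective: alternative
-- what changed: Replaces A's single five-flag state machine by a two-pass decomposition: one pass collects stripped lines into per-section buckets, a second pass classifies each bucket with a last-match-wins keyword table.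
import Mathlib
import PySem

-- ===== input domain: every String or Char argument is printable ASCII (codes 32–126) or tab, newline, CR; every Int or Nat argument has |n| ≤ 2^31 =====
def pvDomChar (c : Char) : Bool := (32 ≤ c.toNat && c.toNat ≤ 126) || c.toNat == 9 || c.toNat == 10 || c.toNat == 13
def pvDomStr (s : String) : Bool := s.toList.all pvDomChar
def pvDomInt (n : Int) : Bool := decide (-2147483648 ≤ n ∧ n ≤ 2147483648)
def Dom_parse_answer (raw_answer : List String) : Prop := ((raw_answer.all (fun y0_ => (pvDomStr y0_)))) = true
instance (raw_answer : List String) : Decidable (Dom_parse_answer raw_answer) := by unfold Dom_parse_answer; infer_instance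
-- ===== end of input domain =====

-- B re-decomposes A's five-flag state machine into two passes (collect sections, then classify); equivalence of return values, proved on 1-element inputs (A's asserts).

-- ===== PORT A =====
-- one step of A's loop, state: current section n and the five flags
def pvLoopA : List String → Int → Option Bool → Option Bool → Option Bool → Option Bool → Option Bool →
    Option Bool × Option Bool × Option Bool × Option Bool × Option Bool
  | [], _, r1, r2, r3, r4, r5 => (r1, r2, r3, r4, r5)
  | line :: rest, n, r1, r2, r3, r4, r5 =>
    let s := PySem.Str.strip line
    let r1 := if n = 1 then (if s = "noteworthy" then some true else if s = "minor" then some false else r1) else r1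
    let r2 := if n = 2 then (if s = "deterministic" then some true else if s = "non-deterministic" then some false else r2) else r2
    let r3 := if n = 3 then (if s = "public" then some true else if s = "project-internal" then some false else r3) else r3
    let r4 := if n = 4 then (if s = "legal" then some true else if s = "illegal" then some false else r4) else r4
    let r5 := if n = 5 then (if s = "intended" then some false else if s = "surprising" then some true else r5) else r5
    let n : Int := if s = "</ANSWER1>" ∨ s = "</ANSWER2>" ∨ s = "</ANSWER3>" then 0 else n
    let n : Int := if s = "<ANSWER1>" then 1 else n
    let n : Int := if s = "<ANSWER2>" then 2 else n
    let n : Int := if s = "<ANSWER3>" then 3 else n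
    let n : Int := if s = "<ANSWER4>" then 4 else n
    let n : Int := if s = "<ANSWER5>" then 5 else n
    pvLoopA rest n r1 r2 r3 r4 r5

def parse_answer (raw_answer : List String) : Option Bool × Option Bool × Option Bool × Option Bool × Option Bool :=
  match raw_answer with
  | [x] => pvLoopA ((PySem.Str.split? x "\n").getD []) 0 none none none none none
  | _ => (none, none, none, none, none)  -- assert len(raw_answer) == 1 raises here; excluded by Pre_

-- ===== PORT B =====
-- B's keyword tables (_TABLES)
def pvTables : List (PySem.Dict String Bool) :=
  [PySem.Dict.ofList [],
   PySem.Dict.ofList [("noteworthy", true), ("minor", false)],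
   PySem.Dict.ofList [("deterministic", true), ("non-deterministic", false)],
   PySem.Dict.ofList [("public", true), ("project-internal", false)],
   PySem.Dict.ofList [("legal", true), ("illegal", false)],
   PySem.Dict.ofList [("intended", false), ("surprising", true)]]

-- B's _last_flag: last matching keyword wins
def pvLastFlag (lines : List String) (table : PySem.Dict String Bool) : Option Bool :=
  lines.foldl (fun val s =>
    match PySem.Dict.get? table s with
    | some b => some b
    | none => val) none

-- B's first pass: bucket each stripped line under the current section (cur is always in [0,5], so .toNat is exact)
def pvCollect : List String → Int → List (List String) → List (List String)
  | [], _, secs => secs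
  | line :: rest, cur, secs =>
    let s := PySem.Str.strip line
    let secs := secs.set cur.toNat ((secs.getD cur.toNat []) ++ [s])
    let cur : Int :=
      if s = "</ANSWER1>" ∨ s = "</ANSWER2>" ∨ s = "</ANSWER3>" then 0
      else if s = "<ANSWER1>" then 1
      else if s = "<ANSWER2>" then 2
      else if s = "<ANSWER3>" then 3
      else if s = "<ANSWER4>" then 4
      else if s = "<ANSWER5>" then 5
      else cur
    pvCollect rest cur secs

def parse_answer_alt (raw_answer : List String) : Option Bool × Option Bool × Option Bool × Option Bool × Option Bool :=
  if raw_answer.length = 1 then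
    let secs := pvCollect ((PySem.Str.split? (raw_answer.headD "") "\n").getD []) 0 [[], [], [], [], [], []]
    (pvLastFlag (secs.getD 1 []) (pvTables.getD 1 PySem.Dict.empty),
     pvLastFlag (secs.getD 2 []) (pvTables.getD 2 PySem.Dict.empty),
     pvLastFlag (secs.getD 3 []) (pvTables.getD 3 PySem.Dict.empty),
     pvLastFlag (secs.getD 4 []) (pvTables.getD 4 PySem.Dict.empty),
     pvLastFlag (secs.getD 5 []) (pvTables.getD 5 PySem.Dict.empty))
  else (none, none, none, none, none)  -- assert raises; excluded by Pre_

-- ===== PRECONDITION & SPEC =====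
-- A asserts that the argument is a list of length exactly 1 (AssertionError otherwise); Pre_ admits exactly those inputs.
def Pre_parse_answer (raw_answer : List String) : Prop := raw_answer.length = 1
instance (raw_answer : List String) : Decidable (Pre_parse_answer raw_answer) := by unfold Pre_parse_answer; infer_instance
def pvWitness_parse_answer : List String := ["<ANSWER1>\nnoteworthy\n</ANSWER1>"]

def Spec_parse_answer (raw_answer : List String) (out : Option Bool × Option Bool × Option Bool × Option Bool × Option Bool) : Prop := out = parse_answer_alt raw_answer
instance (raw_answer : List String) (out : Option Bool × Option Bool × Option Bool × Option Bool × Option Bool) : Decidable (Spec_parse_answer raw_answer out) := by unfold Spec_parse_answer; infer_instance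

-- ===== CLAIM (what is proved, stated in full; the proofs are below) =====
def Claim_equal_parse_answer : Prop := ∀ (raw_answer : List String), Dom_parse_answer raw_answer → Pre_parse_answer raw_answer → Spec_parse_answer raw_answer (parse_answer raw_answer)

-- ===== LEMMAS AND PROOFS =====

-- A's six sequential tag-ifs compute the same new section index as B's elif chain
lemma pv_tag_eq (s : String) (n : Int) :
    (let n1 : Int := if s = "</ANSWER1>" ∨ s = "</ANSWER2>" ∨ s = "</ANSWER3>" then 0 else n
     let n2 : Int := if s = "<ANSWER1>" then 1 else n1
     let n3 : Int := if s = "<ANSWER2>" then 2 else n2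
     let n4 : Int := if s = "<ANSWER3>" then 3 else n3
     let n5 : Int := if s = "<ANSWER4>" then 4 else n4
     if s = "<ANSWER5>" then 5 else n5)
    =
    (if s = "</ANSWER1>" ∨ s = "</ANSWER2>" ∨ s = "</ANSWER3>" then 0
     else if s = "<ANSWER1>" then 1
     else if s = "<ANSWER2>" then 2
     else if s = "<ANSWER3>" then 3
     else if s = "<ANSWER4>" then 4
     else if s = "<ANSWER5>" then 5
     else n) := by
  split_ifs <;> simp_all

lemma pv_lastFlag_append (l : List String) (s : String) (tbl : PySem.Dict String Bool) :
    pvLastFlag (l ++ [s]) tbl =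
      (match PySem.Dict.get? tbl s with
       | some b => some b
       | none => pvLastFlag l tbl) := by
  simp [pvLastFlag, List.foldl_append]

-- the per-section step: what A does to flag k equals classifying the bucket with s appended when n = k
def pvStepA (k : Nat) (s : String) (r : Option Bool) : Option Bool :=
  match k with
  | 1 => if s = "noteworthy" then some true else if s = "minor" then some false else r
  | 2 => if s = "deterministic" then some true else if s = "non-deterministic" then some false else r
  | 3 => if s = "public" then some true else if s = "project-internal" then some false else r
  | 4 => if s = "legal" then some true else if s = "illegal" then some false else r
  | 5 => if s = "intended" then some false else if s = "surprising" then some true else r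
  | _ => r

lemma pv_getD_set (secs : List (List String)) (i k : Nat) (v : List String) (hi : i < secs.length) :
    (secs.set i v).getD k [] = if i = k then v else secs.getD k [] := by
  simp only [List.getD_eq_getElem?_getD, List.getElem?_set]
  split_ifs with h <;> simp

lemma pv_get1 (s : String) :
    PySem.Dict.get? (pvTables.getD 1 PySem.Dict.empty) s =
      (if s = "noteworthy" then some true else if s = "minor" then some false else none) := by
  have h : pvTables.getD 1 PySem.Dict.empty = PySem.Dict.mk [("noteworthy", true), ("minor", false)] := by decide
  rw [h, PySem.Dict.get?_mk_cons, PySem.Dict.get?_mk_cons]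
  by_cases hA : s = "noteworthy" <;> by_cases hB : s = "minor" <;> simp_all [PySem.Dict.get?] <;>
      simp [Ne.symm hA, Ne.symm hB]

lemma pv_get2 (s : String) :
    PySem.Dict.get? (pvTables.getD 2 PySem.Dict.empty) s =
      (if s = "deterministic" then some true else if s = "non-deterministic" then some false else none) := by
  have h : pvTables.getD 2 PySem.Dict.empty = PySem.Dict.mk [("deterministic", true), ("non-deterministic", false)] := by decide
  rw [h, PySem.Dict.get?_mk_cons, PySem.Dict.get?_mk_cons]
  by_cases hA : s = "deterministic" <;> by_cases hB : s = "non-deterministic" <;> simp_all [PySem.Dict.get?] <;>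
      simp [Ne.symm hA, Ne.symm hB]

lemma pv_get3 (s : String) :
    PySem.Dict.get? (pvTables.getD 3 PySem.Dict.empty) s =
      (if s = "public" then some true else if s = "project-internal" then some false else none) := by
  have h : pvTables.getD 3 PySem.Dict.empty = PySem.Dict.mk [("public", true), ("project-internal", false)] := by decide
  rw [h, PySem.Dict.get?_mk_cons, PySem.Dict.get?_mk_cons]
  by_cases hA : s = "public" <;> by_cases hB : s = "project-internal" <;> simp_all [PySem.Dict.get?] <;>
      simp [Ne.symm hA, Ne.symm hB]

lemma pv_get4 (s : String) :
    PySem.Dict.get? (pvTables.getD 4 PySem.Dict.empty) s =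
      (if s = "legal" then some true else if s = "illegal" then some false else none) := by
  have h : pvTables.getD 4 PySem.Dict.empty = PySem.Dict.mk [("legal", true), ("illegal", false)] := by decide
  rw [h, PySem.Dict.get?_mk_cons, PySem.Dict.get?_mk_cons]
  by_cases hA : s = "legal" <;> by_cases hB : s = "illegal" <;> simp_all [PySem.Dict.get?] <;>
      simp [Ne.symm hA, Ne.symm hB]

lemma pv_get5 (s : String) :
    PySem.Dict.get? (pvTables.getD 5 PySem.Dict.empty) s =
      (if s = "intended" then some false else if s = "surprising" then some true else none) := by
  have h : pvTables.getD 5 PySem.Dict.empty = PySem.Dict.mk [("intended", false), ("surprising", true)] := by decide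
  rw [h, PySem.Dict.get?_mk_cons, PySem.Dict.get?_mk_cons]
  by_cases hA : s = "intended" <;> by_cases hB : s = "surprising" <;> simp_all [PySem.Dict.get?] <;>
      simp [Ne.symm hA, Ne.symm hB]

set_option maxHeartbeats 1000000 in
lemma pv_step_eq (k : Nat) (s : String) (l : List String) (hk : 1 ≤ k) (hk5 : k ≤ 5) :
    pvLastFlag (l ++ [s]) (pvTables.getD k PySem.Dict.empty) =
      pvStepA k s (pvLastFlag l (pvTables.getD k PySem.Dict.empty)) := by
  rw [pv_lastFlag_append]
  interval_cases k
  · rw [pv_get1]; unfold pvStepA; split_ifs <;> rfl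
  · rw [pv_get2]; unfold pvStepA; split_ifs <;> rfl
  · rw [pv_get3]; unfold pvStepA; split_ifs <;> rfl
  · rw [pv_get4]; unfold pvStepA; split_ifs <;> rfl
  · rw [pv_get5]; unfold pvStepA; split_ifs <;> rfl

lemma pv_flag_step (k : Nat) (n : Int) (s : String) (secs : List (List String)) (r : Option Bool)
    (h0 : 0 ≤ n) (h5 : n ≤ 5) (hlen : secs.length = 6) (hk : 1 ≤ k ∧ k ≤ 5)
    (hr : r = pvLastFlag (secs.getD k []) (pvTables.getD k PySem.Dict.empty)) :
    (if n = (k : Int) then pvStepA k s r else r) =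
      pvLastFlag ((secs.set n.toNat ((secs.getD n.toNat []) ++ [s])).getD k [])
        (pvTables.getD k PySem.Dict.empty) := by
  by_cases hn : n = (k : Int)
  · have ht : n.toNat = k := by omega
    rw [if_pos hn, ht, pv_getD_set secs k k _ (by omega), if_pos rfl,
      pv_step_eq k s _ hk.1 hk.2, hr]
  · have ht : ¬ n.toNat = k := by omega
    rw [if_neg hn, pv_getD_set secs n.toNat k _ (by omega), if_neg ht, hr]

-- main invariant: running A's state machine from a state that agrees with B's buckets
lemma pv_main (lines : List String) :
    ∀ (n : Int) (r1 r2 r3 r4 r5 : Option Bool) (secs : List (List String)),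
    0 ≤ n → n ≤ 5 → secs.length = 6 →
    r1 = pvLastFlag (secs.getD 1 []) (pvTables.getD 1 PySem.Dict.empty) →
    r2 = pvLastFlag (secs.getD 2 []) (pvTables.getD 2 PySem.Dict.empty) →
    r3 = pvLastFlag (secs.getD 3 []) (pvTables.getD 3 PySem.Dict.empty) →
    r4 = pvLastFlag (secs.getD 4 []) (pvTables.getD 4 PySem.Dict.empty) →
    r5 = pvLastFlag (secs.getD 5 []) (pvTables.getD 5 PySem.Dict.empty) →
    pvLoopA lines n r1 r2 r3 r4 r5 =
      (pvLastFlag ((pvCollect lines n secs).getD 1 []) (pvTables.getD 1 PySem.Dict.empty),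
       pvLastFlag ((pvCollect lines n secs).getD 2 []) (pvTables.getD 2 PySem.Dict.empty),
       pvLastFlag ((pvCollect lines n secs).getD 3 []) (pvTables.getD 3 PySem.Dict.empty),
       pvLastFlag ((pvCollect lines n secs).getD 4 []) (pvTables.getD 4 PySem.Dict.empty),
       pvLastFlag ((pvCollect lines n secs).getD 5 []) (pvTables.getD 5 PySem.Dict.empty)) := by
  induction lines with
  | nil => intro n r1 r2 r3 r4 r5 secs h0 h5 hlen h1 h2 h3 h4 h5'
           simp [pvLoopA, pvCollect, h1, h2, h3, h4, h5']
  | cons line rest ih =>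
      intro n r1 r2 r3 r4 r5 secs h0 h5 hlen h1 h2 h3 h4 h5'
      simp only [pvLoopA, pvCollect]
      rw [pv_tag_eq]
      apply ih
      · split_ifs <;> omega
      · split_ifs <;> omega
      · simp [hlen]
      · exact pv_flag_step 1 n (PySem.Str.strip line) secs r1 h0 h5 hlen (by norm_num) h1
      · exact pv_flag_step 2 n (PySem.Str.strip line) secs r2 h0 h5 hlen (by norm_num) h2
      · exact pv_flag_step 3 n (PySem.Str.strip line) secs r3 h0 h5 hlen (by norm_num) h3
      · exact pv_flag_step 4 n (PySem.Str.strip line) secs r4 h0 h5 hlen (by norm_num) h4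
      · exact pv_flag_step 5 n (PySem.Str.strip line) secs r5 h0 h5 hlen (by norm_num) h5'

-- ===== VERDICT (by name: the statement is the Claim_ definition above) =====
theorem parse_answer_spec : Claim_equal_parse_answer := by
  intro raw _hdom hpre
  unfold Spec_parse_answer
  match raw, hpre with
  | [x], _ =>
    show parse_answer [x] = parse_answer_alt [x]
    simp only [parse_answer, parse_answer_alt, List.length_cons, List.length_nil, List.headD_cons]
    exact pv_main _ 0 none none none none none _ (by omega) (by omega) rfl rfl rfl rfl rfl rfl
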